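-- pv_equiv track=rewrite | github.com/Datatailr/datatailr-examples | datatailr_demo/data_pipelines/dag_generator.py | _build_layer_sizes
-- ===== SOURCE A (Python) =====
-- import math
-- from typing import Any, List
--
-- def _build_layer_sizes(num_tasks: int) -> List[int]:
--     """Partition *num_tasks* into layer sizes that form a diamond shape.
--
--     The first layer fans out, middle layers stay wide, and the last layer
--     fans in to a single aggregation task.
--
--     Returns a list where each element is the number of tasks in that layer.
--     """
--     if num_tasks <= 0:
--         raise ValueError("num_tasks must be a positive integer")
--     if num_tasks == 1:
--         return [1]
--     if num_tasks == 2: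
--         return [1, 1]
--
--     # Reserve 1 task for the final aggregation
--     remaining = num_tasks - 1
--     # First layer: ~sqrt of remaining, at least 1
--     first_layer = max(1, int(math.sqrt(remaining)))
--     remaining -= first_layer
--
--     layers: List[int] = [first_layer]
--
--     if remaining <= 0:
--         layers.append(1)
--         return layers
--
--     # Distribute the rest into middle layers of roughly the same width
--     width = first_layer
--     while remaining > 0:
--         layer = min(width, remaining)
--         layers.append(layer)
--         remaining -= layer
--
--     # Final aggregation task (already counted in num_tasks - 1 above)
--     layers.append(1)
--     return layers
-- ===== SOURCE B (Python) =====
-- import math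
-- from typing import List
--
-- def _build_layer_sizes(num_tasks: int) -> List[int]:
--     if num_tasks <= 0:
--         raise ValueError("num_tasks must be a positive integer")
--     if num_tasks == 1:
--         return [1]
--     if num_tasks == 2:
--         return [1, 1]
--
--     remaining = num_tasks - 1
--     first_layer = max(1, math.isqrt(remaining))
--     remaining -= first_layer
--     if remaining <= 0:
--         return [first_layer, 1]
--
--     q, r = divmod(remaining, first_layer)
--     middle = [first_layer] * q + ([r] if r else [])
--     return [first_layer] + middle + [1]
-- ===== Notes on version B (the rewrite author's own statement) =====
-- stated objective: simpler
-- what changed: Replaces the one-chunk-per-iteration distribution loop by a closed-form divmod: middle layers are [width]*q plus a remainder chunk when r != 0.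
import Mathlib
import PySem

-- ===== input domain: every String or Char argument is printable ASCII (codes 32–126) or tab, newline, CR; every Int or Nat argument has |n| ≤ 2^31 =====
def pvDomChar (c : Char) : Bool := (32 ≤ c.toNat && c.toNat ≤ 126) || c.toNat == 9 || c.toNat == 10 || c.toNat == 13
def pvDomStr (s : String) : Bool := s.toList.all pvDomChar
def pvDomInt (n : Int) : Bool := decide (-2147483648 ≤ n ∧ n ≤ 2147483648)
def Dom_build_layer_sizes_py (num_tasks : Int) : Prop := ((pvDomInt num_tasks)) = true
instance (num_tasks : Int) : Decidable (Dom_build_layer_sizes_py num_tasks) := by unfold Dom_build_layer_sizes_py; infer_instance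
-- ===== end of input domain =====

-- B replaces A's one-chunk-per-iteration distribution loop by a closed-form divmod (objective: simpler).

-- ===== PORT A =====
-- The while-loop of A: while remaining > 0: layer = min(width, remaining); append; remaining -= layer.
-- The guard also requires 0 < width only to make the recursion total; A always calls it with width ≥ 1.
def aLoop (width rem : Int) : List Int :=
  if h : 0 < rem ∧ 0 < width then
    min width rem :: aLoop width (rem - min width rem)
  else []
termination_by rem.toNat
decreasing_by
  have h1 : 1 ≤ min width rem := le_min h.2 h.1
  have h2 : min width rem ≤ rem := min_le_right _ _
  omega

-- int(math.sqrt(x)) equals the integer square root for all x in Dom (|x| ≤ 2^31, where the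
-- double-precision sqrt is accurate enough that flooring it gives isqrt); ported as Int.sqrt.
def build_layer_sizes_py (num_tasks : Int) : List Int :=
  if num_tasks ≤ 0 then []  -- Python raises ValueError here; excluded by Pre_
  else if num_tasks = 1 then [1]
  else if num_tasks = 2 then [1, 1]
  else
    let remaining := num_tasks - 1
    let first_layer := max 1 (Int.sqrt remaining)
    let remaining := remaining - first_layer
    let layers := [first_layer]
    if remaining ≤ 0 then layers ++ [1]
    else (layers ++ aLoop first_layer remaining) ++ [1]

-- ===== PORT B =====
def build_layer_sizes_py_alt (num_tasks : Int) : List Int :=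
  if num_tasks ≤ 0 then []  -- Python raises ValueError here; excluded by Pre_
  else if num_tasks = 1 then [1]
  else if num_tasks = 2 then [1, 1]
  else
    let remaining := num_tasks - 1
    let first_layer := max 1 (Int.sqrt remaining)
    let remaining := remaining - first_layer
    if remaining ≤ 0 then [first_layer, 1]
    else
      let q := PySem.Int.floordiv remaining first_layer
      let r := PySem.Int.mod remaining first_layer
      let middle := List.replicate q.toNat first_layer ++ (if r ≠ 0 then [r] else [])
      [first_layer] ++ middle ++ [1]

-- ===== PRECONDITION & SPEC =====
-- A raises ValueError exactly on num_tasks <= 0.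
def Pre_build_layer_sizes_py (num_tasks : Int) : Prop := 1 ≤ num_tasks
instance (num_tasks : Int) : Decidable (Pre_build_layer_sizes_py num_tasks) := by unfold Pre_build_layer_sizes_py; infer_instance
def pvWitness_build_layer_sizes_py : Int := (7)

def Spec_build_layer_sizes_py (num_tasks : Int) (out : List Int) : Prop := out = build_layer_sizes_py_alt num_tasks
instance (num_tasks : Int) (out : List Int) : Decidable (Spec_build_layer_sizes_py num_tasks out) := by unfold Spec_build_layer_sizes_py; infer_instance

-- ===== CLAIM (what is proved, stated in full; the proofs are below) =====
def Claim_equal_build_layer_sizes_py : Prop := ∀ (num_tasks : Int), Dom_build_layer_sizes_py num_tasks → Pre_build_layer_sizes_py num_tasks → Spec_build_layer_sizes_py num_tasks (build_layer_sizes_py num_tasks)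

-- ===== LEMMAS AND PROOFS =====

-- A's distribution loop produces q full-width chunks and, if the remainder is nonzero, one remainder chunk.
theorem aLoop_eq (w : Int) (hw : 0 < w) :
    ∀ (n : Nat) (rem : Int), rem.toNat ≤ n → 0 < rem →
      aLoop w rem =
        List.replicate (PySem.Int.floordiv rem w).toNat w ++
          (if PySem.Int.mod rem w ≠ 0 then [PySem.Int.mod rem w] else []) := by
  intro n
  induction n with
  | zero => intro rem h hr; omega
  | succ n ih =>
    intro rem h hr
    rw [PySem.Int.floordiv_eq_ediv_of_pos hw, PySem.Int.mod_eq_emod_of_pos hw]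
    rw [aLoop]
    rw [dif_pos ⟨hr, hw⟩]
    rcases lt_trichotomy rem w with hlt | heq | hgt
    · -- rem < w : single chunk of size rem
      have hmin : min w rem = rem := min_eq_right hlt.le
      rw [hmin, sub_self]
      rw [aLoop, dif_neg (by omega)]
      have hd : rem / w = 0 := Int.ediv_eq_zero_of_lt hr.le hlt
      have hm : rem % w = rem := Int.emod_eq_of_lt hr.le hlt
      simp [hd, hm, hr.ne']
    · -- rem = w : exactly one full chunk
      subst heq
      have hmin : min rem rem = rem := min_self rem
      rw [hmin, sub_self]
      rw [aLoop, dif_neg (by omega)]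
      simp [Int.ediv_self hr.ne', Int.toNat_one]
    · -- rem > w : take one full chunk and recurse
      have hmin : min w rem = w := min_eq_left hgt.le
      rw [hmin]
      have hrec := ih (rem - w) (by omega) (by omega)
      rw [PySem.Int.floordiv_eq_ediv_of_pos hw, PySem.Int.mod_eq_emod_of_pos hw] at hrec
      rw [hrec]
      have hdiv : rem / w = (rem - w) / w + 1 := by
        have := Int.add_mul_ediv_right (rem - w) 1 hw.ne'
        simp at this
        omega
      have hmod : rem % w = (rem - w) % w := (Int.sub_emod_right rem w).symm
      have hnn : 0 ≤ (rem - w) / w := Int.ediv_nonneg (by omega) hw.le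
      rw [hdiv, hmod]
      have htn : ((rem - w) / w + 1).toNat = ((rem - w) / w).toNat + 1 := by omega
      rw [htn, List.replicate_succ]
      simp

theorem build_layer_sizes_py_spec : Claim_equal_build_layer_sizes_py := by
  intro n _ hpre
  unfold Spec_build_layer_sizes_py build_layer_sizes_py build_layer_sizes_py_alt
  have h0 : ¬ n ≤ 0 := by unfold Pre_build_layer_sizes_py at hpre; omega
  rw [if_neg h0, if_neg h0]
  by_cases h1 : n = 1
  · simp [h1]
  by_cases h2 : n = 2
  · simp [h2]
  rw [if_neg h1, if_neg h1, if_neg h2, if_neg h2]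
  simp only
  set fl := max 1 (Int.sqrt (n - 1)) with hfl
  have hflpos : 0 < fl := lt_of_lt_of_le one_pos (le_max_left _ _) |>.trans_le (le_refl _)
  by_cases hrem : n - 1 - fl ≤ 0
  · rw [if_pos hrem, if_pos hrem]
    rfl
  · rw [if_neg hrem, if_neg hrem]
    rw [aLoop_eq fl hflpos (n - 1 - fl).toNat (n - 1 - fl) le_rfl (by omega)]

-- ===== VERDICT (by name: the statement is the Claim_ definition above) =====
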